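-- pv_equiv track=rewrite | github.com/mr-mahmood/Quera-Solution | Codes/easy/132252/132252_1.py | smallest_two
-- ===== SOURCE A (Python) =====
-- def smallest_two(target):
--
--     small1 = None
--
--     small2 = None
--
--     for num1 in range(1,target):
--
--         if target % num1 == 0:
--
--             num2 = target//num1
--
--             if (small1 is None) or (num1+num2 < small1+small2):
--
--                 small1, small2 = num1, num2
--
--     return small1, small2
-- ===== SOURCE B (Python) =====
-- def smallest_two(target):
--     # Scan only up to sqrt(target): the pair with the smallest sum is
--     # (d, target // d) where d is the largest divisor with d*d <= target.
--     if target < 2: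
--         return (None, None)
--     d = 1
--     i = 1
--     while i * i <= target:
--         if target % i == 0:
--             d = i
--         i += 1
--     return (d, target // d)
-- ===== Notes on version B (the rewrite author's own statement) =====
-- stated objective: faster
-- what changed: B scans candidate divisors only up to sqrt(target) keeping the largest divisor d with d*d <= target, and returns (d, target//d), instead of A's full scan of range(1, target) tracking the minimal-sum pair.
import Mathlib
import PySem

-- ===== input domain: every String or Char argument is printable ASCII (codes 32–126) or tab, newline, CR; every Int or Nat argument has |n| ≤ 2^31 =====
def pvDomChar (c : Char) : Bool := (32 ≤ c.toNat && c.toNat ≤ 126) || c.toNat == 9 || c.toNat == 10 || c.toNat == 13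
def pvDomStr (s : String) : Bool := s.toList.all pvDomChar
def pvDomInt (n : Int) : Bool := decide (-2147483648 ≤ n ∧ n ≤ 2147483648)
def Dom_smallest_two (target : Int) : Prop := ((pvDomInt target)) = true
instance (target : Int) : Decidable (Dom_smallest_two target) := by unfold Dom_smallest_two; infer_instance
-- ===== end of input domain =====

-- B replaces A's scan of range(1, target) with a scan of divisors up to sqrt(target):
-- the minimal-sum pair is (d, target // d) for the largest divisor d with d*d ≤ target.

-- ===== PORT A =====
-- one iteration of A's for-loop body; state = (small1, small2)
def aStep (target : Int) (s : Option Int × Option Int) (num1 : Int) :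
    Option Int × Option Int :=
  if PySem.Int.mod target num1 = 0 then
    let num2 := PySem.Int.floordiv target num1
    match s with
    | (none, _) => (some num1, some num2)
    | (some s1, some s2) =>
        if num1 + num2 < s1 + s2 then (some num1, some num2) else (some s1, some s2)
    | (some s1, none) => (some s1, none)  -- never reached: small1 and small2 are set together
  else s

def smallest_two (target : Int) : Option Int × Option Int :=
  (PySem.List.pyRange 1 target 1).foldl (aStep target) (none, none)

-- ===== PORT B =====
-- termination helper for the while-loop of B (cited in decreasing_by)
lemma pv_le_of_sq_le {i t : Int} (h : i * i ≤ t) : i ≤ t := by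
  by_cases h0 : i ≤ 0
  · exact h0.trans (le_trans (mul_self_nonneg i) h)
  · push_neg at h0; nlinarith

-- B's while loop: i counts up while i*i ≤ target, d keeps the last divisor seen
def bLoop (target i d : Int) : Int :=
  if h : i * i ≤ target then
    bLoop target (i + 1) (if PySem.Int.mod target i = 0 then i else d)
  else d
termination_by (target + 2 - i).toNat
decreasing_by
  have := pv_le_of_sq_le h
  omega

def smallest_two_alt (target : Int) : Option Int × Option Int :=
  if target < 2 then (none, none)
  else
    let d := bLoop target 1 1
    (some d, some (PySem.Int.floordiv target d))

-- ===== PRECONDITION & SPEC =====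
def Spec_smallest_two (target : Int) (out : Option Int × Option Int) : Prop := out = smallest_two_alt target
instance (target : Int) (out : Option Int × Option Int) : Decidable (Spec_smallest_two target out) := by unfold Spec_smallest_two; infer_instance

-- ===== CLAIM (what is proved, stated in full; the proofs are below) =====
def Claim_equal_smallest_two : Prop := ∀ (target : Int), Dom_smallest_two target → Spec_smallest_two target (smallest_two target)

-- ===== LEMMAS AND PROOFS =====

-- m is the largest divisor of t with m*m ≤ t
def IsBest (t m : Int) : Prop :=
  1 ≤ m ∧ m ∣ t ∧ m * m ≤ t ∧ ∀ e, 1 ≤ e → e ∣ t → e * e ≤ t → e ≤ m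

-- m is the largest divisor of t with m*m ≤ t among 1..k
def BestUpTo (t k m : Int) : Prop :=
  1 ≤ m ∧ m ≤ k ∧ m ∣ t ∧ m * m ≤ t ∧
    ∀ e, 1 ≤ e → e ≤ k → e ∣ t → e * e ≤ t → e ≤ m

lemma isBest_unique {t m d : Int} (hm : IsBest t m) (hd : IsBest t d) : m = d :=
  le_antisymm (hd.2.2.2 m hm.1 hm.2.1 hm.2.2.1) (hm.2.2.2 d hd.1 hd.2.1 hd.2.2.1)

-- a larger divisor still ≤ sqrt t gives a strictly smaller pair sum
lemma sum_lt {t m b : Int} (hm : 1 ≤ m) (hmb : m < b) (hbb : b * b ≤ t)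
    (hmd : m ∣ t) (hbd : b ∣ t) : b + t / b < m + t / m := by
  obtain ⟨p, hp⟩ := hmd
  obtain ⟨q, hq⟩ := hbd
  have hm0 : (0 : Int) < m := hm
  have hb0 : (0 : Int) < b := lt_trans hm0 hmb
  have hpm : t / m = p := by rw [hp, Int.mul_ediv_cancel_left _ (ne_of_gt hm0)]
  have hqb : t / b = q := by rw [hq, Int.mul_ediv_cancel_left _ (ne_of_gt hb0)]
  rw [hpm, hqb]
  have hmbt : m * b < t := by nlinarith
  have key : m * b * (m + p - b - q) = (b - m) * (t - m * b) := by
    linear_combination (-b) * hp + m * hq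
  by_contra hcon
  push_neg at hcon
  have h1 : (0:Int) < (b - m) * (t - m * b) :=
    mul_pos (by omega) (by omega)
  have h2 : m * b * (m + p - b - q) ≤ 0 :=
    mul_nonpos_of_nonneg_of_nonpos (le_of_lt (mul_pos hm0 hb0)) (by omega)
  omega

-- a smaller divisor (both ≤ sqrt t) gives a pair sum at least as large
lemma sum_le {t q m : Int} (hq : 1 ≤ q) (hqm : q ≤ m) (hmm : m * m ≤ t)
    (hqd : q ∣ t) (hmd : m ∣ t) : m + t / m ≤ q + t / q := by
  obtain ⟨p, hp⟩ := hmd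
  obtain ⟨r, hr⟩ := hqd
  have hq0 : (0 : Int) < q := hq
  have hm0 : (0 : Int) < m := lt_of_lt_of_le hq0 hqm
  have hpm : t / m = p := by rw [hp, Int.mul_ediv_cancel_left _ (ne_of_gt hm0)]
  have hrq : t / q = r := by rw [hr, Int.mul_ediv_cancel_left _ (ne_of_gt hq0)]
  rw [hpm, hrq]
  have hqmt : q * m ≤ t := by nlinarith
  have key : q * m * (q + r - m - p) = (m - q) * (t - q * m) := by
    linear_combination (-m) * hr + q * hp
  by_contra hcon
  push_neg at hcon
  have h1 : (0:Int) ≤ (m - q) * (t - q * m) :=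
    mul_nonneg (by omega) (by omega)
  have h2 : q * m * (q + r - m - p) < 0 :=
    mul_neg_of_pos_of_neg (mul_pos hq0 hm0) (by omega)
  omega

-- A's fold over 1..(n+1) ends in the best divisor among 1..(n+1)
lemma aFold_spec (t : Int) (ht : 2 ≤ t) :
    ∀ n : Nat, (n : Int) + 1 ≤ t - 1 →
      ∃ m, BestUpTo t ((n : Int) + 1) m ∧
        (PySem.List.pyRange 1 ((n : Int) + 2) 1).foldl (aStep t) (none, none)
          = (some m, some (PySem.Int.floordiv t m)) := by
  intro n
  induction n with
  | zero =>
      intro _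
      refine ⟨1, ⟨le_refl 1, by norm_num, one_dvd t, by norm_num; omega,
        fun e he1 hek _ _ => by omega⟩, ?_⟩
      have h1 : ((0 : Nat) : Int) + 2 = (1 : Int) + 1 := by norm_num
      rw [h1, PySem.List.pyRange_one_singleton]
      simp only [List.foldl, aStep]
      rw [if_pos ((PySem.Int.mod_eq_zero_iff_dvd t 1).mpr (one_dvd t))]
  | succ n ih =>
      intro hle
      have hle' : (n : Int) + 1 ≤ t - 1 := by push_cast at hle ⊢; omega
      obtain ⟨m, ⟨hm1, hmk, hmd, hmm, hbest⟩, hfold⟩ := ih hle'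
      set b : Int := (n : Int) + 2 with hb
      have hbpos : (0 : Int) < b := by positivity
      have hcast1 : (((n + 1 : Nat)) : Int) + 1 = b := by push_cast; omega
      have hcast2 : (((n + 1 : Nat)) : Int) + 2 = b + 1 := by push_cast; omega
      rw [hcast1, hcast2, PySem.List.pyRange_one_succ_right (by omega),
        List.foldl_append, hfold]
      simp only [List.foldl]
      by_cases hdb : b ∣ t
      · -- b divides: compare with the current best
        simp only [aStep, PySem.Int.mod_eq_zero_iff_dvd]
        rw [if_pos hdb]
        by_cases hbb : b * b ≤ t
        · -- b ≤ sqrt t: A updates, and b is the new best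
          have hcond : b + PySem.Int.floordiv t b < m + PySem.Int.floordiv t m := by
            rw [PySem.Int.floordiv_eq_ediv_of_pos hbpos,
              PySem.Int.floordiv_eq_ediv_of_pos hm1]
            exact sum_lt hm1 (by omega) hbb hmd hdb
          refine ⟨b, ⟨by omega, le_refl b, hdb, hbb, fun e he1 hek _ _ => hek⟩, ?_⟩
          simp only [hcond, if_pos]
        · -- b > sqrt t: cofactor q = t/b was already seen, A does not update
          obtain ⟨q, hq⟩ := hdb
          have hq1 : 1 ≤ q := by nlinarith
          have hqb : q < b := by nlinarith
          have hqd : q ∣ t := ⟨b, by rw [hq]; ring⟩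
          have hqq : q * q ≤ t := by nlinarith
          have hqm : q ≤ m := hbest q hq1 (by omega) hqd hqq
          have htq : t / b = q := by rw [hq, Int.mul_ediv_cancel_left _ (ne_of_gt hbpos)]
          have htq' : t / q = b := by
            rw [hq, mul_comm, Int.mul_ediv_cancel_left _ (ne_of_gt hq1)]
          have hncond : ¬ (b + PySem.Int.floordiv t b < m + PySem.Int.floordiv t m) := by
            rw [PySem.Int.floordiv_eq_ediv_of_pos hbpos,
              PySem.Int.floordiv_eq_ediv_of_pos hm1, not_lt, htq]
            have := sum_le hq1 hqm hmm hqd hmd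
            rw [htq'] at this
            omega
          refine ⟨m, ⟨hm1, by omega, hmd, hmm, fun e he1 hek hed hee => ?_⟩, ?_⟩
          · rcases eq_or_lt_of_le hek with h | h
            · exact absurd (h ▸ hee) hbb
            · exact hbest e he1 (by omega) hed hee
          · simp only [hncond, if_false]
      · -- b does not divide: state unchanged
        simp only [aStep, PySem.Int.mod_eq_zero_iff_dvd]
        rw [if_neg hdb]
        refine ⟨m, ⟨hm1, by omega, hmd, hmm, fun e he1 hek hed hee => ?_⟩, rfl⟩
        rcases eq_or_lt_of_le hek with h | h
        · exact absurd (h ▸ hed) hdb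
        · exact hbest e he1 (by omega) hed hee

-- A's final value for t ≥ 2
lemma aFinal (t : Int) (ht : 2 ≤ t) :
    ∃ m, IsBest t m ∧ smallest_two t = (some m, some (PySem.Int.floordiv t m)) := by
  obtain ⟨n, hn⟩ : ∃ n : Nat, (n : Int) = t - 2 := ⟨(t - 2).toNat, Int.toNat_of_nonneg (by omega)⟩
  obtain ⟨m, ⟨hm1, hmk, hmd, hmm, hbest⟩, hfold⟩ := aFold_spec t ht n (by omega)
  refine ⟨m, ⟨hm1, hmd, hmm, fun e he1 hed hee => ?_⟩, ?_⟩
  · refine hbest e he1 ?_ hed hee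
    have het : e ≤ t - 1 := by
      by_cases h : e ≤ t - 1
      · exact h
      · push_neg at h; exfalso; nlinarith
    omega
  · unfold smallest_two
    have ht2 : t = (n : Int) + 2 := by omega
    rw [ht2] at hfold ⊢
    exact hfold

-- B's loop computes the best divisor
lemma bLoop_isBest (t : Int) (ht : 2 ≤ t) :
    ∀ N : Nat, ∀ i d : Int, (t + 2 - i).toNat ≤ N → 1 ≤ i → 1 ≤ d → d ≤ i → d ∣ t →
      d * d ≤ t → (∀ e, 1 ≤ e → e < i → e ∣ t → e ≤ d) → IsBest t (bLoop t i d) := by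
  intro N
  induction N with
  | zero =>
      intro i d hN hi hd1 hdi hdd hddt hinv
      have hi4 : t + 2 ≤ i := by omega
      have hii : ¬ i * i ≤ t := by nlinarith
      rw [bLoop, dif_neg hii]
      exact ⟨hd1, hdd, hddt, fun e he1 hed hee => hinv e he1 (by nlinarith) hed⟩
  | succ N ih =>
      intro i d hN hi hd1 hdi hdd hddt hinv
      rw [bLoop]
      split_ifs with hii hmod
      · have hit : i ≤ t := pv_le_of_sq_le hii
        have hdvd : i ∣ t := (PySem.Int.mod_eq_zero_iff_dvd t i).mp hmod
        refine ih (i + 1) i (by omega) (by omega) hi (by omega) hdvd hii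
          (fun e he1 hei hed => ?_)
        rcases eq_or_lt_of_le (show e ≤ i by omega) with h | h
        · omega
        · exact le_trans (hinv e he1 h hed) hdi
      · have hit : i ≤ t := pv_le_of_sq_le hii
        have hdvd : ¬ i ∣ t := fun h => hmod ((PySem.Int.mod_eq_zero_iff_dvd t i).mpr h)
        refine ih (i + 1) d (by omega) (by omega) hd1 (by omega) hdd hddt
          (fun e he1 hei hed => ?_)
        rcases eq_or_lt_of_le (show e ≤ i by omega) with h | h
        · exact absurd (h ▸ hed) hdvd
        · exact hinv e he1 h hed
      · exact ⟨hd1, hdd, hddt, fun e he1 hed hee => hinv e he1 (by nlinarith) hed⟩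

lemma bFinal (t : Int) (ht : 2 ≤ t) : IsBest t (bLoop t 1 1) :=
  bLoop_isBest t ht (t + 1).toNat 1 1 (by omega) le_rfl le_rfl le_rfl (one_dvd t)
    (by nlinarith) (fun e he1 hei _ => by omega)

-- ===== VERDICT (by name: the statement is the Claim_ definition above) =====
theorem smallest_two_spec : Claim_equal_smallest_two := by
  intro target _
  unfold Spec_smallest_two
  by_cases hlt : target < 2
  · unfold smallest_two smallest_two_alt
    rw [if_pos hlt, PySem.List.pyRange_one_eq_nil (by omega)]
    rfl
  · push_neg at hlt
    obtain ⟨m, hmB, hfold⟩ := aFinal target hlt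
    have hmd : m = bLoop target 1 1 := isBest_unique hmB (bFinal target hlt)
    rw [hmd] at hfold
    rw [hfold]
    unfold smallest_two_alt
    rw [if_neg (by omega)]
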